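-- pv_equiv track=rewrite | github.com/Snow-White-Group/The-CSU-K-Rule-Based-System-for-the-2nd-Edition-Spoken-CALL-Shared-Task | rule_based_text_processor.py | contains_compound_noun_if_necessary
-- ===== SOURCE A (Python) =====
-- def contains_compound_noun_if_necessary(filtered_rec_result_tuples, prompt_responses, tokenized_responses):
--     noun_index = 0
--     compound_noun_dict = dict()
--     for tokenized_response in tokenized_responses:
--         response_has_compound_noun = False
--         noun_dict = dict()
--         for tuple_index, response_tuple in enumerate(tokenized_response):
--             if (response_tuple[1] == 'NN' or response_tuple[1] == 'NNS' or response_tuple[1] == 'JJ') and response_tuple[0] != "i" and response_tuple[0] != "please" and response_tuple[0] != "yes":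
--                 noun_dict[tuple_index] = response_tuple[0]
--
--         for key in noun_dict.keys():
--             # if there is a related noun but the array is empty then add both nouns (for NN NN)
--             if (key-1) in noun_dict and noun_index not in compound_noun_dict:
--                 response_has_compound_noun = True
--                 compound_noun_dict[noun_index] = noun_dict[key-1] + " " + noun_dict[key]
--             # if there is a related noun which is already in the array then add the new one (for NN NN NN...)
--             elif (key-1) in noun_dict and noun_index in compound_noun_dict:
--                 compound_noun_dict[noun_index] += " " + noun_dict[key]
--             # if there is no related noun and the current array index is not empty increase it
--             elif (key-1) not in noun_dict and noun_index in compound_noun_dict: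
--                 noun_index += 1
--
--         if not response_has_compound_noun:
--             # there are responses, without compound noun
--             return True
--
--         noun_index += 1
--
--     compound_noun_set = set(compound_noun_dict.values())
--     compount_nouns_1 = sorted(compound_noun_set) # sorts normally by alphabetical order
--     compount_nouns_1.sort(key=len, reverse=True) # sorts by descending length
--     if compount_nouns_1:
--         # check for match in rec resultx
--         words, tags = zip(*filtered_rec_result_tuples)
--         rec_result = " ".join(words)
--         for compound_noun in compount_nouns_1:
--             if compound_noun in rec_result:
--                 return True
--         return False
--
--     # no compound noun needed in rec result
--     return True
-- ===== SOURCE B (Python) =====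
-- def contains_compound_noun_if_necessary(filtered_rec_result_tuples, prompt_responses, tokenized_responses):
--     phrases = set()
--     for tokenized_response in tokenized_responses:
--         response_has_compound_noun = False
--         run = []
--         for word, tag in tokenized_response + [("", "")]:
--             if tag in ("NN", "NNS", "JJ") and word not in ("i", "please", "yes"):
--                 run.append(word)
--             else:
--                 if len(run) >= 2:
--                     phrases.add(" ".join(run))
--                     response_has_compound_noun = True
--                 run = []
--         if not response_has_compound_noun:
--             # a response without any compound noun: nothing is required
--             return True
--     if not phrases:
--         return True
--     rec_result = " ".join(word for word, _ in filtered_rec_result_tuples)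
--     return any(phrase in rec_result for phrase in phrases)
-- ===== Notes on version B (the rewrite author's own statement) =====
-- stated objective: simpler
-- what changed: B replaces A's two-dict bookkeeping (per-response index-keyed noun_dict, then a key loop growing a cross-response compound_noun_dict via a running noun_index) and its dead double sort by a single left-to-right scan per response that keeps the current run of qualifying tokens and adds each maximal run of length >= 2 to one set of phrases.
-- crash fix: On inputs where every one of the (>= 1) tokenized_responses contains a compound noun but filtered_rec_result_tuples is empty, A raises ValueError (unpacking zip(*[])) while B returns False (no phrase occurs in the empty recognition result). — e.g. on contains_compound_noun_if_necessary([], [], [[("red", "JJ"), ("car", "NN")]]): A raises ValueError, B returns false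
import Mathlib
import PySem

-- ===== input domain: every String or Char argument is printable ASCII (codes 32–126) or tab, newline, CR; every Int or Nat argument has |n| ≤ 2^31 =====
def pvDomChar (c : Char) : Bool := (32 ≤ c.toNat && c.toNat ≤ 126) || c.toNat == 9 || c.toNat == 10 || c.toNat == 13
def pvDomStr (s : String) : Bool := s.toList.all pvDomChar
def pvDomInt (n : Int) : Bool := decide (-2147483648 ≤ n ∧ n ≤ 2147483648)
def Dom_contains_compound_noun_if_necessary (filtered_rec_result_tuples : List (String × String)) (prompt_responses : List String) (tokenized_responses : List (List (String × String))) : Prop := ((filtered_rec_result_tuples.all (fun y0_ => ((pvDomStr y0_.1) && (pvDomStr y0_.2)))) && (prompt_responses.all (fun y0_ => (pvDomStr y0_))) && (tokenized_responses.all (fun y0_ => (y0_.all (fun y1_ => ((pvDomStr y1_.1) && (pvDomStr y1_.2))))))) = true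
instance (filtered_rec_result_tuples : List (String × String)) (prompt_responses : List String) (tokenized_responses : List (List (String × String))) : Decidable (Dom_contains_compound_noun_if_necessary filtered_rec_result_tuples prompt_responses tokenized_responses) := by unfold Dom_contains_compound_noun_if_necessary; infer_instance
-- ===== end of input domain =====

-- B replaces A's index-keyed dict bookkeeping (per-token noun_dict + cross-response compound_noun_dict
-- with a running noun_index) by a single sequential scan that maintains the current run of qualifying
-- tokens and collects the phrases of all maximal runs of length >= 2 into one set (objective: simpler).


-- ===== PORT A =====
-- inner loop building noun_dict[tuple_index] = word for the qualifying tokens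
def pvA_nounDict (tokenized_response : List (String × String)) : PySem.Dict Int String :=
  (PySem.List.enumerate tokenized_response).foldl
    (fun noun_dict p =>
      if (p.2.2 == "NN" || p.2.2 == "NNS" || p.2.2 == "JJ") && p.2.1 != "i" && p.2.1 != "please" && p.2.1 != "yes"
      then noun_dict.insert p.1 p.2.1 else noun_dict)
    PySem.Dict.empty

-- body of the 'for key in noun_dict.keys()' loop; state = (response_has_compound_noun, noun_index, compound_noun_dict)
def pvA_keyStep (noun_dict : PySem.Dict Int String)
    (st : Bool × Int × PySem.Dict Int String) (key : Int) : Bool × Int × PySem.Dict Int String :=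
  if noun_dict.contains (key - 1) && !st.2.2.contains st.2.1 then
    -- noun_dict[key-1] / noun_dict[key] are present here (key-1 by the test, key iterates keys): getD is exact
    (true, st.2.1, st.2.2.insert st.2.1 (noun_dict.getD (key - 1) "" ++ " " ++ noun_dict.getD key ""))
  else if noun_dict.contains (key - 1) && st.2.2.contains st.2.1 then
    (st.1, st.2.1, st.2.2.modify st.2.1 "" (fun v => v ++ " " ++ noun_dict.getD key ""))
  else if !noun_dict.contains (key - 1) && st.2.2.contains st.2.1 then
    (st.1, st.2.1 + 1, st.2.2)
  else st

-- outer 'for tokenized_response in tokenized_responses' loop; none = the early 'return True'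
def pvA_loop : List (List (String × String)) → Int → PySem.Dict Int String → Option (PySem.Dict Int String)
  | [], _, compound_noun_dict => some compound_noun_dict
  | tokenized_response :: rest, noun_index, compound_noun_dict =>
    let noun_dict := pvA_nounDict tokenized_response
    let r := noun_dict.keys.foldl (pvA_keyStep noun_dict) (false, noun_index, compound_noun_dict)
    if !r.1 then none else pvA_loop rest (r.2.1 + 1) r.2.2

def contains_compound_noun_if_necessary (filtered_rec_result_tuples : List (String × String)) (prompt_responses : List String) (tokenized_responses : List (List (String × String))) : Bool :=
  match pvA_loop tokenized_responses 0 PySem.Dict.empty with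
  | none => true
  | some compound_noun_dict =>
    let compound_noun_set : PySem.Set String := PySem.Set.ofList compound_noun_dict.values
    let compount_nouns_1 := PySem.List.sorted compound_noun_set (fun x => x) false
    let compount_nouns_2 := PySem.List.sorted compount_nouns_1 (fun s => PySem.Str.len s) true
    if !compount_nouns_2.isEmpty then
      -- 'words, tags = zip(*filtered_rec_result_tuples)' raises ValueError on []: those inputs are outside Pre_
      let words := filtered_rec_result_tuples.map Prod.fst
      let rec_result := PySem.Str.join " " words
      compount_nouns_2.any (fun compound_noun => PySem.Str.isIn compound_noun rec_result)
    else true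

-- ===== PORT B =====
-- one token of the scan; state = (response_has_compound_noun, run, phrases); the "" tag never qualifies
def pvB_step (st : Bool × List String × PySem.Set String) (t : String × String) : Bool × List String × PySem.Set String :=
  if (t.2 == "NN" || t.2 == "NNS" || t.2 == "JJ") && !(t.1 == "i" || t.1 == "please" || t.1 == "yes") then
    (st.1, st.2.1 ++ [t.1], st.2.2)
  else if 2 ≤ st.2.1.length then
    (true, [], st.2.2.add (PySem.Str.join " " st.2.1))
  else (st.1, [], st.2.2)

def pvB_loop : List (List (String × String)) → PySem.Set String → Option (PySem.Set String)
  | [], phrases => some phrases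
  | tokenized_response :: rest, phrases =>
    let r := (tokenized_response ++ [("", "")]).foldl pvB_step (false, [], phrases)
    if !r.1 then none else pvB_loop rest r.2.2

def contains_compound_noun_if_necessary_alt (filtered_rec_result_tuples : List (String × String)) (prompt_responses : List String) (tokenized_responses : List (List (String × String))) : Bool :=
  match pvB_loop tokenized_responses PySem.Set.empty with
  | none => true
  | some phrases =>
    if phrases.isEmpty then true
    else
      let rec_result := PySem.Str.join " " (filtered_rec_result_tuples.map Prod.fst)
      phrases.any (fun phrase => PySem.Str.isIn phrase rec_result)

-- ===== PRECONDITION & SPEC =====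
-- a token qualifies for a compound noun (tag NN/NNS/JJ, word not i/please/yes)
def pvQual (t : String × String) : Bool :=
  (t.2 == "NN" || t.2 == "NNS" || t.2 == "JJ") && !(t.1 == "i" || t.1 == "please" || t.1 == "yes")

-- the response contains two consecutive qualifying tokens (i.e. a compound noun)
def pvHasCompound (toks : List (String × String)) : Bool :=
  (List.range toks.length).any (fun i => pvQual (toks.getD i ("", "")) && pvQual (toks.getD (i + 1) ("", "")))

-- Pre_ excludes exactly the inputs on which A raises ValueError (unpacking zip(*[])): an empty
-- filtered_rec_result_tuples while every one of the (≥ 1) tokenized_responses contains a compound noun.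
def Pre_contains_compound_noun_if_necessary (filtered_rec_result_tuples : List (String × String)) (prompt_responses : List String) (tokenized_responses : List (List (String × String))) : Prop :=
  ¬ (filtered_rec_result_tuples = [] ∧ tokenized_responses ≠ [] ∧ tokenized_responses.all pvHasCompound = true)
instance (filtered_rec_result_tuples : List (String × String)) (prompt_responses : List String) (tokenized_responses : List (List (String × String))) : Decidable (Pre_contains_compound_noun_if_necessary filtered_rec_result_tuples prompt_responses tokenized_responses) := by unfold Pre_contains_compound_noun_if_necessary; infer_instance

def pvWitness_contains_compound_noun_if_necessary : (List (String × String)) × List String × (List (List (String × String))) :=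
  ([("red", "JJ"), ("car", "NN")], ["a prompt"], [[("red", "JJ"), ("car", "NN")]])

-- On the excluded inputs A raises ValueError ('not enough values to unpack' from zip(*[])) while B returns False (no phrase occurs in the empty recognition result).
def Raises_contains_compound_noun_if_necessary (filtered_rec_result_tuples : List (String × String)) (prompt_responses : List String) (tokenized_responses : List (List (String × String))) : Prop :=
  filtered_rec_result_tuples = [] ∧ tokenized_responses ≠ [] ∧ tokenized_responses.all pvHasCompound = true
instance (filtered_rec_result_tuples : List (String × String)) (prompt_responses : List String) (tokenized_responses : List (List (String × String))) : Decidable (Raises_contains_compound_noun_if_necessary filtered_rec_result_tuples prompt_responses tokenized_responses) := by unfold Raises_contains_compound_noun_if_necessary; infer_instance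

def pvRaiseWitness_contains_compound_noun_if_necessary : (List (String × String)) × List String × (List (List (String × String))) :=
  ([], [], [[("red", "JJ"), ("car", "NN")]])
def pvRaiseWitnessOut_contains_compound_noun_if_necessary : Bool := false

def Spec_contains_compound_noun_if_necessary (filtered_rec_result_tuples : List (String × String)) (prompt_responses : List String) (tokenized_responses : List (List (String × String))) (out : Bool) : Prop := out = contains_compound_noun_if_necessary_alt filtered_rec_result_tuples prompt_responses tokenized_responses
instance (filtered_rec_result_tuples : List (String × String)) (prompt_responses : List String) (tokenized_responses : List (List (String × String))) (out : Bool) : Decidable (Spec_contains_compound_noun_if_necessary filtered_rec_result_tuples prompt_responses tokenized_responses out) := by unfold Spec_contains_compound_noun_if_necessary; infer_instance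

-- ===== CLAIM (what is proved, stated in full; the proofs are below) =====
def Claim_equal_contains_compound_noun_if_necessary : Prop := ∀ (filtered_rec_result_tuples : List (String × String)) (prompt_responses : List String) (tokenized_responses : List (List (String × String))), Dom_contains_compound_noun_if_necessary filtered_rec_result_tuples prompt_responses tokenized_responses → Pre_contains_compound_noun_if_necessary filtered_rec_result_tuples prompt_responses tokenized_responses → Spec_contains_compound_noun_if_necessary filtered_rec_result_tuples prompt_responses tokenized_responses (contains_compound_noun_if_necessary filtered_rec_result_tuples prompt_responses tokenized_responses)

def Claim_raises_contains_compound_noun_if_necessary : Prop := (∀ (filtered_rec_result_tuples : List (String × String)) (prompt_responses : List String) (tokenized_responses : List (List (String × String))), Dom_contains_compound_noun_if_necessary filtered_rec_result_tuples prompt_responses tokenized_responses → Raises_contains_compound_noun_if_necessary filtered_rec_result_tuples prompt_responses tokenized_responses → ¬ Pre_contains_compound_noun_if_necessary filtered_rec_result_tuples prompt_responses tokenized_responses) ∧ (Dom_contains_compound_noun_if_necessary (pvRaiseWitness_contains_compound_noun_if_necessary.1) (pvRaiseWitness_contains_compound_noun_if_necessary.2.1) (pvRaiseWitness_contains_compound_noun_if_necessary.2.2)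 ∧ Raises_contains_compound_noun_if_necessary (pvRaiseWitness_contains_compound_noun_if_necessary.1) (pvRaiseWitness_contains_compound_noun_if_necessary.2.1) (pvRaiseWitness_contains_compound_noun_if_necessary.2.2) ∧ contains_compound_noun_if_necessary_alt (pvRaiseWitness_contains_compound_noun_if_necessary.1) (pvRaiseWitness_contains_compound_noun_if_necessary.2.1) (pvRaiseWitness_contains_compound_noun_if_necessary.2.2) = pvRaiseWitnessOut_contains_compound_noun_if_necessary)

-- ===== LEMMAS AND PROOFS =====

lemma chars_join_append (sep w : List Char) : ∀ (run : List (List Char)), run ≠ [] →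
    PySem.Chars.join sep (run ++ [w]) = PySem.Chars.join sep run ++ sep ++ w
  | [], h => absurd rfl h
  | [a], _ => by
      simp [PySem.Chars.join_cons_cons, PySem.Chars.join_singleton]
  | a :: b :: rest, _ => by
      have ih := chars_join_append sep w (b :: rest) (by simp)
      rw [show (b :: rest ++ [w] : List (List Char)) = b :: (rest ++ [w]) by simp] at ih
      rw [show a :: b :: rest ++ [w] = a :: b :: (rest ++ [w]) by simp,
        PySem.Chars.join_cons_cons, ih, PySem.Chars.join_cons_cons]
      simp [List.append_assoc]

lemma pvJoin_append (run : List String) (w : String) (h : run ≠ []) :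
    PySem.Str.join " " (run ++ [w]) = PySem.Str.join " " run ++ " " ++ w := by
  apply String.toList_inj.mp
  simp only [PySem.Str.join, String.toList_append, String.toList_ofList, List.map_append,
    List.map_cons, List.map_nil]
  rw [chars_join_append _ _ _ (by simpa using h)]

def pvFlush (run : List String) : List String :=
  if 2 ≤ run.length then [PySem.Str.join " " run] else []

def pvRunsFrom (run : List String) : List (String × String) → List String
  | [] => pvFlush run
  | t :: rest => if pvQual t then pvRunsFrom (run ++ [t.1]) rest else pvFlush run ++ pvRunsFrom [] rest

def pvRuns (toks : List (String × String)) : List String := pvRunsFrom [] toks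

def pvRunsAll : List (List (String × String)) → Option (List String)
  | [] => some []
  | tr :: rest => if (pvRuns tr).isEmpty then none else (pvRunsAll rest).map (pvRuns tr ++ ·)

lemma pvB_step_eq (st : Bool × List String × PySem.Set String) (t : String × String) :
    pvB_step st t = if pvQual t then (st.1, st.2.1 ++ [t.1], st.2.2)
      else if 2 ≤ st.2.1.length then (true, [], st.2.2.add (PySem.Str.join " " st.2.1))
      else (st.1, [], st.2.2) := rfl

lemma pvB_fold (toks : List (String × String)) : ∀ (found : Bool) (run : List String) (phrases : PySem.Set String),
    (toks ++ [("", "")]).foldl pvB_step (found, run, phrases)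
    = (found || !(pvRunsFrom run toks).isEmpty, [], (pvRunsFrom run toks).foldl PySem.Set.add phrases) := by
  induction toks with
  | nil =>
    intro found run phrases
    have hq : pvQual ("", "") = false := by decide
    simp only [List.nil_append, List.foldl_cons, List.foldl_nil, pvRunsFrom, pvFlush, pvB_step_eq, hq]
    by_cases h : 2 ≤ run.length <;> simp [h]
  | cons t rest ih =>
    intro found run phrases
    simp only [List.cons_append, List.foldl_cons, pvRunsFrom, pvB_step_eq]
    by_cases hq : pvQual t
    · simp only [hq, if_true, ih]
    · simp only [hq, Bool.false_eq_true, if_false, pvFlush]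
      by_cases h : 2 ≤ run.length
      · simp [h, ih]
      · simp only [h, if_false, ih, List.nil_append]

lemma pvB_loop_spec : ∀ (trs : List (List (String × String))) (phrases : PySem.Set String),
    pvB_loop trs phrases = (pvRunsAll trs).map (fun rs => rs.foldl PySem.Set.add phrases) := by
  intro trs
  induction trs with
  | nil => intro phrases; rfl
  | cons tr rest ih =>
    intro phrases
    simp only [pvB_loop, pvB_fold, pvRunsAll, pvRuns]
    by_cases h : (pvRunsFrom [] tr).isEmpty
    · simp [h]
    · simp only [h, Bool.not_false, Bool.false_or, ih]
      cases pvRunsAll rest <;> simp [List.foldl_append]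

def pvQf (i : Int) (toks : List (String × String)) : List (Int × String) :=
  ((PySem.List.enumerate toks i).filter (fun p => pvQual p.2)).map (fun p => (p.1, p.2.1))

lemma pvEnumerate_cons (t : String × String) (rest : List (String × String)) (i : Int) :
    PySem.List.enumerate (t :: rest) i = (i, t) :: PySem.List.enumerate rest (i + 1) := rfl

lemma pvEnumerate_fst_ge : ∀ (toks : List (String × String)) (i : Int), ∀ p ∈ PySem.List.enumerate toks i, i ≤ p.1
  | [], _, p, hp => absurd hp (by simp [PySem.List.enumerate])
  | t :: rest, i, p, hp => by
    rw [pvEnumerate_cons] at hp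
    rcases List.mem_cons.mp hp with h | h
    · simp [h]
    · have := pvEnumerate_fst_ge rest (i + 1) p (by simpa using h)
      omega

lemma pvEnumerate_pairwise : ∀ (toks : List (String × String)) (i : Int),
    (PySem.List.enumerate toks i).Pairwise (fun a b => a.1 < b.1)
  | [], _ => by simp [PySem.List.enumerate]
  | t :: rest, i => by
    rw [pvEnumerate_cons]
    refine List.Pairwise.cons ?_ (pvEnumerate_pairwise rest (i + 1))
    intro p hp
    have := pvEnumerate_fst_ge rest (i + 1) p hp
    simp; omega

lemma pvCondA_eq (p : Int × (String × String)) :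
    ((p.2.2 == "NN" || p.2.2 == "NNS" || p.2.2 == "JJ") && p.2.1 != "i" && p.2.1 != "please" && p.2.1 != "yes")
      = pvQual p.2 := by
  simp only [pvQual, bne]
  cases p.2.2 == "NN" <;> cases p.2.2 == "NNS" <;> cases p.2.2 == "JJ" <;>
    cases p.2.1 == "i" <;> cases p.2.1 == "please" <;> cases p.2.1 == "yes" <;> rfl

lemma pvQf_pairwise (toks : List (String × String)) (i : Int) :
    (pvQf i toks).Pairwise (fun a b => a.1 < b.1) := by
  unfold pvQf
  exact List.pairwise_map.mpr ((pvEnumerate_pairwise toks i).sublist List.filter_sublist)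

lemma pvA_nounDict_items (tr : List (String × String)) :
    (pvA_nounDict tr).items = pvQf 0 tr := by
  unfold pvA_nounDict
  have h1 : ∀ (nd : PySem.Dict Int String) (p : Int × (String × String)),
      (if (p.2.2 == "NN" || p.2.2 == "NNS" || p.2.2 == "JJ") && p.2.1 != "i" && p.2.1 != "please" && p.2.1 != "yes"
       then nd.insert p.1 p.2.1 else nd)
      = (if pvQual p.2 then nd.insert p.1 p.2.1 else nd) := by
    intro nd p; rw [pvCondA_eq]
  rw [PySem.List.foldl_congr_mem
    (l := PySem.List.enumerate tr 0) (init := (PySem.Dict.empty : PySem.Dict Int String))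
    (f := fun noun_dict p =>
      if (p.2.2 == "NN" || p.2.2 == "NNS" || p.2.2 == "JJ") && p.2.1 != "i" && p.2.1 != "please" && p.2.1 != "yes"
      then noun_dict.insert p.1 p.2.1 else noun_dict)
    (g := fun noun_dict p => if pvQual p.2 then noun_dict.insert p.1 p.2.1 else noun_dict)
    (fun nd p _ => h1 nd p)]
  rw [PySem.List.foldl_if_eq_foldl_filter (fun q : Int × (String × String) => pvQual q.2)
    (fun (nd : PySem.Dict Int String) q => nd.insert q.1 q.2.1) (PySem.List.enumerate tr 0) PySem.Dict.empty]
  rw [PySem.Dict.items_foldl_insert_fresh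
    (l := (PySem.List.enumerate tr 0).filter (fun q => pvQual q.2))
    (k := fun q : Int × (String × String) => q.1) (v := fun q : Int × (String × String) => q.2.1)
    (d := PySem.Dict.empty) (by simp) ?_]
  · simp [pvQf, PySem.Dict.empty]
  · have := pvQf_pairwise tr 0
    unfold pvQf at this
    have : (((PySem.List.enumerate tr 0).filter (fun p => pvQual p.2)).map Prod.fst).Pairwise (· < ·) := by
      simpa [List.pairwise_map] using this
    exact this.nodup.imp (fun h => by omega)

def pvIrs (prev : Int) (run : List String) : List (Int × String) → List String
  | [] => pvFlush run
  | (k, w) :: rest => if k = prev + 1 then pvIrs k (run ++ [w]) rest else pvFlush run ++ pvIrs k [w] rest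

lemma pvJoin_singleton (a : String) : PySem.Str.join " " [a] = a := by
  apply String.toList_inj.mp
  simp [PySem.Str.join, PySem.Chars.join_singleton]

lemma pvNotContains_of_lt (cd : PySem.Dict Int String) (ni : Int) (h : ∀ k ∈ cd.keys, k < ni) :
    cd.contains ni = false := by
  rw [PySem.Dict.contains_eq_decide_mem_keys]
  simp only [decide_eq_false_iff_not]
  intro hm; exact absurd (h ni hm) (by omega)

lemma pvValues_insert_fresh (cd : PySem.Dict Int String) (ni : Int) (v : String)
    (h : cd.contains ni = false) : (cd.insert ni v).values = cd.values ++ [v] := by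
  rw [PySem.Dict.values, PySem.Dict.items_insert_of_not_contains cd v h]; simp [PySem.Dict.values]

lemma pvKeys_insert_fresh (cd : PySem.Dict Int String) (ni : Int) (v : String)
    (h : cd.contains ni = false) : (cd.insert ni v).keys = cd.keys ++ [ni] := by
  rw [PySem.Dict.keys, PySem.Dict.items_insert_of_not_contains cd v h]; simp [PySem.Dict.keys]

lemma pvModify_insert (cd : PySem.Dict Int String) (ni : Int) (v : String) (f : String → String) :
    (cd.insert ni v).modify ni "" f = cd.insert ni (f v) := by
  show (cd.insert ni v).insert ni (f ((cd.insert ni v).getD ni "")) = cd.insert ni (f v)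
  rw [PySem.Dict.getD_insert_self, PySem.Dict.insert_insert_self]

lemma pvIrs_ne_nil : ∀ (qs : List (Int × String)) (prev : Int) (run : List String),
    2 ≤ run.length → (pvIrs prev run qs).isEmpty = false
  | [], prev, run, h => by simp [pvIrs, pvFlush, h]
  | (k, w) :: rest, prev, run, h => by
    simp only [pvIrs]
    by_cases hk : k = prev + 1
    · simp only [hk, if_true]
      exact pvIrs_ne_nil rest (prev + 1) (run ++ [w]) (by simp; omega)
    · simp [hk, pvFlush, h]

lemma pvND_nodup_keys (nd : PySem.Dict Int String)
    (hpair : (nd.items.map Prod.fst).Pairwise (· < ·)) : nd.keys.Nodup := by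
  have : nd.keys.Pairwise (· < ·) := by simpa [PySem.Dict.keys] using hpair
  exact this.imp (fun h => by omega)

lemma pvContains_pred (nd : PySem.Dict Int String) (pre : List (Int × String)) (pw : Int × String)
    (k : Int) (w : String) (qs : List (Int × String))
    (hit : nd.items = pre ++ pw :: (k, w) :: qs)
    (hpair : (nd.items.map Prod.fst).Pairwise (· < ·)) :
    nd.contains (k - 1) = decide (pw.1 = k - 1) := by
  rw [PySem.Dict.contains_eq_decide_mem_keys, decide_eq_decide]
  rw [hit] at hpair
  simp only [List.map_append, List.map_cons, List.pairwise_append, List.pairwise_cons] at hpair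
  obtain ⟨-, ⟨hpwk, hkq, -⟩, hcross⟩ := hpair
  have hpwk' : pw.1 < k := hpwk k (by simp)
  constructor
  · intro hm
    rw [PySem.Dict.keys, hit] at hm
    simp only [List.map_append, List.map_cons, List.mem_append, List.mem_cons, List.mem_map] at hm
    rcases hm with ⟨p, hp, hp1⟩ | h | h | ⟨p, hp, hp1⟩
    · have := hcross p.1 (by exact List.mem_map_of_mem hp) pw.1 (by simp)
      have hk2 := hcross p.1 (by exact List.mem_map_of_mem hp) k (by simp)
      omega
    · omega
    · omega
    · have := hkq p.1 (List.mem_map_of_mem hp)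
      omega
  · intro hm
    rw [PySem.Dict.keys, hit]
    simp only [List.map_append, List.map_cons, List.mem_append, List.mem_cons]
    exact Or.inr (Or.inl hm.symm)

lemma pvContains_first (nd : PySem.Dict Int String) (k : Int) (w : String) (qs : List (Int × String))
    (hit : nd.items = (k, w) :: qs)
    (hpair : (nd.items.map Prod.fst).Pairwise (· < ·)) :
    nd.contains (k - 1) = false := by
  rw [PySem.Dict.contains_eq_decide_mem_keys, decide_eq_false_iff_not]
  rw [hit] at hpair
  simp only [List.map_cons, List.pairwise_cons] at hpair
  intro hm
  rw [PySem.Dict.keys, hit] at hm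
  simp only [List.map_cons, List.mem_cons] at hm
  rcases hm with h | h
  · omega
  · have := hpair.1 (k - 1) h
    omega

lemma pvNodupKeys_insert_fresh (cd : PySem.Dict Int String) (ni : Int) (v : String)
    (hnodup : cd.keys.Nodup) (hlt : ∀ k ∈ cd.keys, k < ni) : (cd.insert ni v).keys.Nodup := by
  rw [pvKeys_insert_fresh cd ni v (pvNotContains_of_lt cd ni hlt)]
  refine List.Nodup.append hnodup (List.nodup_singleton ni) ?_
  intro a ha hb
  simp only [List.mem_singleton] at hb
  have := hlt a ha; omega

lemma pvMachine (nd : PySem.Dict Int String)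
    (hpair : (nd.items.map Prod.fst).Pairwise (· < ·)) :
    ∀ (qs pre : List (Int × String)) (pw : Int × String)
      (flag : Bool) (ni : Int) (cd0 : PySem.Dict Int String) (run : List String),
      nd.items = pre ++ pw :: qs →
      run ≠ [] →
      (run.length = 1 → run = [pw.2]) →
      (2 ≤ run.length → flag = true) →
      cd0.keys.Nodup → (∀ k ∈ cd0.keys, k < ni) →
      ((qs.map Prod.fst).foldl (pvA_keyStep nd)
          (flag, ni, if 2 ≤ run.length then cd0.insert ni (PySem.Str.join " " run) else cd0)).1
        = (flag || !(pvIrs pw.1 run qs).isEmpty)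
      ∧ ((qs.map Prod.fst).foldl (pvA_keyStep nd)
          (flag, ni, if 2 ≤ run.length then cd0.insert ni (PySem.Str.join " " run) else cd0)).2.2.values
        = cd0.values ++ pvIrs pw.1 run qs
      ∧ ((qs.map Prod.fst).foldl (pvA_keyStep nd)
          (flag, ni, if 2 ≤ run.length then cd0.insert ni (PySem.Str.join " " run) else cd0)).2.2.keys.Nodup
      ∧ (∀ k ∈ ((qs.map Prod.fst).foldl (pvA_keyStep nd)
          (flag, ni, if 2 ≤ run.length then cd0.insert ni (PySem.Str.join " " run) else cd0)).2.2.keys,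
          k ≤ ((qs.map Prod.fst).foldl (pvA_keyStep nd)
          (flag, ni, if 2 ≤ run.length then cd0.insert ni (PySem.Str.join " " run) else cd0)).2.1)
      ∧ ni ≤ ((qs.map Prod.fst).foldl (pvA_keyStep nd)
          (flag, ni, if 2 ≤ run.length then cd0.insert ni (PySem.Str.join " " run) else cd0)).2.1 := by
  intro qs
  induction qs with
  | nil =>
    intro pre pw flag ni cd0 run hit hne h1 h2 hnodup hlt
    have hc0 : cd0.contains ni = false := pvNotContains_of_lt cd0 ni hlt
    by_cases hlen : 2 ≤ run.length
    · simp only [List.map_nil, List.foldl_nil, hlen, if_true, pvIrs, pvFlush]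
      refine ⟨by simp [h2 hlen], ?_, pvNodupKeys_insert_fresh cd0 ni _ hnodup hlt, ?_, le_refl ni⟩
      · simp [pvValues_insert_fresh cd0 ni _ hc0]
      · rw [pvKeys_insert_fresh cd0 ni _ hc0]
        intro k hk
        rcases List.mem_append.mp hk with h | h
        · exact le_of_lt (hlt _ h)
        · simp at h; omega
    · simp only [List.map_nil, List.foldl_nil, hlen, if_false, pvIrs, pvFlush]
      exact ⟨by simp, by simp, hnodup, fun k hk => le_of_lt (hlt _ hk), le_refl ni⟩
  | cons q rest ih =>
    intro pre pw flag ni cd0 run hit hne h1 h2 hnodup hlt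
    obtain ⟨k, w⟩ := q
    have hc0 : cd0.contains ni = false := pvNotContains_of_lt cd0 ni hlt
    have hcp : nd.contains (k - 1) = decide (pw.1 = k - 1) := pvContains_pred nd pre pw k w rest hit hpair
    have hndk : nd.getD k "" = w := by
      refine PySem.Dict.getD_of_mem_items nd ?_ (pvND_nodup_keys nd hpair) ""
      rw [hit]; simp
    by_cases hk : k = pw.1 + 1
    · -- adjacent: the run continues
      have hcp' : nd.contains (k - 1) = true := by rw [hcp]; simp; omega
      have hndk1 : nd.getD (k - 1) "" = pw.2 := by
        refine PySem.Dict.getD_of_mem_items nd ?_ (pvND_nodup_keys nd hpair) ""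
        rw [hit]
        have hpw : pw = (k - 1, pw.2) := by
          have : pw.1 = k - 1 := by omega
          exact Prod.ext this rfl
        rw [← hpw]; simp
      have hirs : pvIrs pw.1 run ((k, w) :: rest) = pvIrs k (run ++ [w]) rest := by
        simp only [pvIrs]; rw [if_pos hk]
      by_cases hlen : 2 ≤ run.length
      · -- phrase already open: branch 2 (append to compound_noun_dict[noun_index])
        have step : pvA_keyStep nd
            (flag, ni, cd0.insert ni (PySem.Str.join " " run)) k
            = (flag, ni, cd0.insert ni (PySem.Str.join " " (run ++ [w]))) := by
          simp only [pvA_keyStep, hcp', PySem.Dict.contains_insert_self, Bool.not_true,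
            Bool.and_false, Bool.and_true, if_false, if_true, Bool.false_eq_true]
          rw [pvModify_insert, hndk, pvJoin_append run w hne]
        simp only [List.map_cons, List.foldl_cons, hlen, if_true, step, hirs]
        have ihr := ih (pre ++ [pw]) (k, w) flag ni cd0 (run ++ [w])
          (by rw [hit]; simp) (by simp)
          (by intro hc; rw [List.length_append, List.length_singleton] at hc; omega)
          (fun _ => h2 hlen) hnodup hlt
        have hlen2 : 2 ≤ (run ++ [w]).length := by rw [List.length_append, List.length_singleton]; omega
        simp only [hlen2, if_true] at ihr
        exact ihr
      · -- run has one word: branch 1 opens the phrase (for NN NN)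
        have hr1 : run = [pw.2] := h1 (by cases run with | nil => exact absurd rfl hne | cons a t => simp at hlen ⊢; omega)
        have step : pvA_keyStep nd (flag, ni, cd0) k
            = (true, ni, cd0.insert ni (PySem.Str.join " " (run ++ [w]))) := by
          simp only [pvA_keyStep, hcp', hc0, Bool.not_false, Bool.and_true, if_true]
          rw [hndk1, hndk, hr1, pvJoin_append [pw.2] w (by simp), pvJoin_singleton]
        simp only [List.map_cons, List.foldl_cons, hlen, if_false, step, hirs]
        have ihr := ih (pre ++ [pw]) (k, w) true ni cd0 (run ++ [w])
          (by rw [hit]; simp) (by simp)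
          (by intro hc; rw [hr1] at hc; simp at hc)
          (fun _ => rfl) hnodup hlt
        have hlen2 : 2 ≤ (run ++ [w]).length := by rw [hr1]; simp
        simp only [hlen2, if_true] at ihr
        rw [ihr.1, ihr.2.1]
        refine ⟨?_, rfl, ihr.2.2⟩
        have hemp : (pvIrs k (run ++ [w]) rest).isEmpty = false := pvIrs_ne_nil rest k (run ++ [w]) hlen2
        simp [hemp]
    · -- gap: the run (if any phrase was opened) is closed
      have hcp' : nd.contains (k - 1) = false := by rw [hcp]; simp; omega
      have hirs : pvIrs pw.1 run ((k, w) :: rest) = pvFlush run ++ pvIrs k [w] rest := by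
        simp only [pvIrs]; rw [if_neg hk]
      by_cases hlen : 2 ≤ run.length
      · -- phrase open: branch 3 (noun_index += 1)
        have step : pvA_keyStep nd
            (flag, ni, cd0.insert ni (PySem.Str.join " " run)) k
            = (flag, ni + 1, cd0.insert ni (PySem.Str.join " " run)) := by
          simp [pvA_keyStep, hcp', PySem.Dict.contains_insert_self]
        simp only [List.map_cons, List.foldl_cons, hlen, if_true, step, hirs]
        have hlt' : ∀ x ∈ (cd0.insert ni (PySem.Str.join " " run)).keys, x < ni + 1 := by
          rw [pvKeys_insert_fresh cd0 ni _ hc0]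
          intro x hx
          rcases List.mem_append.mp hx with h | h
          · have := hlt _ h; omega
          · simp at h; omega
        have ihr := ih (pre ++ [pw]) (k, w) flag (ni + 1)
          (cd0.insert ni (PySem.Str.join " " run)) [w]
          (by rw [hit]; simp) (by simp) (fun _ => rfl) (by intro hc; simp at hc)
          (pvNodupKeys_insert_fresh cd0 ni _ hnodup hlt) hlt'
        simp only [List.length_singleton] at ihr
        have h21 : ¬ (2 ≤ 1) := by omega
        simp only [h21, if_false] at ihr
        rw [ihr.1, ihr.2.1, pvValues_insert_fresh cd0 ni _ hc0]
        have hford : flag = true := h2 hlen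
        refine ⟨?_, ?_, ihr.2.2.1, ihr.2.2.2.1, by have := ihr.2.2.2.2; omega⟩
        · simp only [pvFlush, hlen, if_true, hford]
          rfl
        · simp only [pvFlush, hlen, if_true, List.append_assoc, List.singleton_append]
      · -- no phrase open: nothing happens on this key
        have step : pvA_keyStep nd (flag, ni, cd0) k = (flag, ni, cd0) := by
          simp [pvA_keyStep, hcp', hc0]
        simp only [List.map_cons, List.foldl_cons, hlen, if_false, step, hirs]
        have ihr := ih (pre ++ [pw]) (k, w) flag ni cd0 [w]
          (by rw [hit]; simp) (by simp) (fun _ => rfl) (by intro hc; simp at hc)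
          hnodup hlt
        simp only [List.length_singleton] at ihr
        have h21 : ¬ (2 ≤ 1) := by omega
        simp only [h21, if_false] at ihr
        simp only [pvFlush, hlen, if_false, List.nil_append]
        exact ihr

lemma pvQf_cons (i : Int) (t : String × String) (rest : List (String × String)) :
    pvQf i (t :: rest) = if pvQual t then (i, t.1) :: pvQf (i + 1) rest else pvQf (i + 1) rest := by
  simp only [pvQf, pvEnumerate_cons, List.filter_cons]
  by_cases h : pvQual t <;> simp [h]

lemma pvIrs_Qf : ∀ (toks : List (String × String)) (i prev : Int) (run : List String), run ≠ [] → prev ≤ i - 1 →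
    pvIrs prev run (pvQf i toks)
      = (if prev = i - 1 then pvRunsFrom run toks else pvFlush run ++ pvRunsFrom [] toks)
  | [], i, prev, run, hne, hle => by
    simp only [pvQf, PySem.List.enumerate, List.filter_nil, List.map_nil, pvIrs, pvRunsFrom]
    by_cases h : prev = i - 1 <;> simp [h, pvFlush]
  | t :: rest, i, prev, run, hne, hle => by
    rw [pvQf_cons]
    by_cases hq : pvQual t
    · simp only [hq, if_true, pvIrs]
      by_cases hp : prev = i - 1
      · rw [if_pos (by omega), if_pos hp]
        have := pvIrs_Qf rest (i + 1) i (run ++ [t.1]) (by simp) (by omega)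
        rw [this, if_pos (by omega)]
        simp [pvRunsFrom, hq]
      · rw [if_neg (by omega), if_neg hp]
        have := pvIrs_Qf rest (i + 1) i [t.1] (by simp) (by omega)
        rw [this, if_pos (by omega)]
        simp [pvRunsFrom, hq]
    · simp only [hq, Bool.false_eq_true, if_false]
      have := pvIrs_Qf rest (i + 1) prev run hne (by omega)
      rw [this, if_neg (by omega)]
      by_cases hp : prev = i - 1 <;>
        simp [hp, pvRunsFrom, hq, pvFlush]
  termination_by toks => toks.length

lemma pvRuns_Qf : ∀ (toks : List (String × String)) (i : Int),
    (match pvQf i toks with | [] => ([] : List String) | (k, w) :: qs => pvIrs k [w] qs)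
      = pvRunsFrom [] toks
  | [], i => by simp [pvQf, PySem.List.enumerate, pvRunsFrom, pvFlush]
  | t :: rest, i => by
    rw [pvQf_cons]
    by_cases hq : pvQual t
    · simp only [hq, if_true]
      show pvIrs i [t.1] (pvQf (i + 1) rest) = _
      rw [pvIrs_Qf rest (i + 1) i [t.1] (by simp) (by omega), if_pos (by omega)]
      simp [pvRunsFrom, hq]
    · simp only [hq, Bool.false_eq_true, if_false]
      rw [pvRuns_Qf rest (i + 1)]
      simp [pvRunsFrom, hq, pvFlush]

lemma pvA_keyfold (tr : List (String × String)) (ni : Int) (cd0 : PySem.Dict Int String)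
    (hnodup : cd0.keys.Nodup) (hlt : ∀ k ∈ cd0.keys, k < ni) :
    ((pvA_nounDict tr).keys.foldl (pvA_keyStep (pvA_nounDict tr)) (false, ni, cd0)).1
      = !(pvRuns tr).isEmpty
    ∧ ((pvA_nounDict tr).keys.foldl (pvA_keyStep (pvA_nounDict tr)) (false, ni, cd0)).2.2.values
      = cd0.values ++ pvRuns tr
    ∧ ((pvA_nounDict tr).keys.foldl (pvA_keyStep (pvA_nounDict tr)) (false, ni, cd0)).2.2.keys.Nodup
    ∧ (∀ k ∈ ((pvA_nounDict tr).keys.foldl (pvA_keyStep (pvA_nounDict tr)) (false, ni, cd0)).2.2.keys,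
        k ≤ ((pvA_nounDict tr).keys.foldl (pvA_keyStep (pvA_nounDict tr)) (false, ni, cd0)).2.1) := by
  have hpair : ((pvA_nounDict tr).items.map Prod.fst).Pairwise (· < ·) := by
    rw [pvA_nounDict_items]
    exact List.pairwise_map.mpr (pvQf_pairwise tr 0)
  have hkeys : (pvA_nounDict tr).keys = (pvQf 0 tr).map Prod.fst := by
    rw [PySem.Dict.keys, pvA_nounDict_items]
  have hruns := pvRuns_Qf tr 0
  cases hq : pvQf 0 tr with
  | nil =>
    rw [hq] at hruns
    simp only [hq] at hkeys
    rw [hkeys]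
    simp only [List.map_nil, List.foldl_nil, pvRuns, ← hruns]
    exact ⟨rfl, by simp, hnodup, fun k hk => le_of_lt (hlt _ hk)⟩
  | cons q qs =>
    obtain ⟨k, w⟩ := q
    rw [hq] at hruns
    simp only [hq, List.map_cons] at hkeys
    rw [hkeys, List.foldl_cons]
    have hit : (pvA_nounDict tr).items = [] ++ (k, w) :: qs := by
      rw [pvA_nounDict_items, hq]; rfl
    have hcf : (pvA_nounDict tr).contains (k - 1) = false :=
      pvContains_first _ k w qs (by simpa using hit) hpair
    have hc0 : cd0.contains ni = false := pvNotContains_of_lt cd0 ni hlt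
    have step : pvA_keyStep (pvA_nounDict tr) (false, ni, cd0) k = (false, ni, cd0) := by
      simp [pvA_keyStep, hcf, hc0]
    rw [step]
    have hm := pvMachine (pvA_nounDict tr) hpair qs [] (k, w) false ni cd0 [w]
      hit (by simp) (fun _ => rfl) (by intro hc; simp at hc) hnodup hlt
    simp only [List.length_singleton] at hm
    have h21 : ¬ (2 ≤ 1) := by omega
    simp only [h21, if_false] at hm
    rw [pvRuns, ← hruns]
    exact ⟨by simpa using hm.1, hm.2.1, hm.2.2.1, hm.2.2.2.1⟩

lemma pvA_loop_spec : ∀ (trs : List (List (String × String))) (ni : Int) (cd0 : PySem.Dict Int String),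
    cd0.keys.Nodup → (∀ k ∈ cd0.keys, k < ni) →
    (pvA_loop trs ni cd0).map PySem.Dict.values = (pvRunsAll trs).map (cd0.values ++ ·) := by
  intro trs
  induction trs with
  | nil => intro ni cd0 _ _; simp [pvA_loop, pvRunsAll]
  | cons tr rest ih =>
    intro ni cd0 hnodup hlt
    have hkf := pvA_keyfold tr ni cd0 hnodup hlt
    simp only [pvA_loop, pvRunsAll, hkf.1]
    by_cases h : (pvRuns tr).isEmpty
    · simp [h]
    · simp only [h, Bool.not_false, Bool.not_true, Bool.false_eq_true, if_false]
      rw [ih _ _ hkf.2.2.1 (fun k hk => by have := hkf.2.2.2 k hk; omega)]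
      rw [hkf.2.1]
      cases pvRunsAll rest <;> simp [List.append_assoc]

lemma pvFinal_eq (f : List (String × String)) (pr : List String) (trs : List (List (String × String))) :
    contains_compound_noun_if_necessary f pr trs = contains_compound_noun_if_necessary_alt f pr trs := by
  unfold contains_compound_noun_if_necessary contains_compound_noun_if_necessary_alt
  have hA := pvA_loop_spec trs 0 PySem.Dict.empty (by simp [PySem.Dict.keys, PySem.Dict.empty])
    (by simp [PySem.Dict.keys, PySem.Dict.empty])
  have hB := pvB_loop_spec trs PySem.Set.empty
  cases hra : pvRunsAll trs with
  | none =>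
    rw [hra, Option.map_none] at hA hB
    rw [Option.map_eq_none_iff] at hA
    rw [hA, hB]
  | some rs =>
    rw [hra, Option.map_some] at hA hB
    obtain ⟨cd, hcd, hval⟩ : ∃ cd, pvA_loop trs 0 PySem.Dict.empty = some cd ∧ cd.values = rs := by
      cases hc : pvA_loop trs 0 PySem.Dict.empty with
      | none => rw [hc] at hA; simp at hA
      | some cd =>
        rw [hc] at hA
        refine ⟨cd, rfl, ?_⟩
        simpa [PySem.Dict.values, PySem.Dict.empty] using hA
    rw [hcd, hB]
    dsimp only
    have hset : rs.foldl PySem.Set.add PySem.Set.empty = PySem.Set.ofList rs := rfl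
    rw [hval, hset]
    have hperm : (PySem.List.sorted (PySem.List.sorted (PySem.Set.ofList rs) (fun x => x) false)
        (fun s => PySem.Str.len s) true).Perm (PySem.Set.ofList rs) :=
      (PySem.List.sorted_perm _ _ _).trans (PySem.List.sorted_perm _ _ _)
    have hemp : (PySem.List.sorted (PySem.List.sorted (PySem.Set.ofList rs) (fun x => x) false)
        (fun s => PySem.Str.len s) true).isEmpty = (PySem.Set.ofList rs).isEmpty := by
      have := hperm.length_eq
      rcases h1 : PySem.List.sorted (PySem.List.sorted (PySem.Set.ofList rs) (fun x => x) false)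
          (fun s => PySem.Str.len s) true with _ | ⟨a, l⟩ <;>
        rcases h2 : PySem.Set.ofList rs with _ | ⟨b, m⟩ <;>
          simp_all
    have hany := hperm.any_eq (f := fun phrase =>
      PySem.Str.isIn phrase (PySem.Str.join " " (f.map Prod.fst)))
    rw [hemp, hany]
    cases (PySem.Set.ofList rs).isEmpty <;> simp

-- ===== VERDICT (by name: the statement is the Claim_ definition above) =====
theorem contains_compound_noun_if_necessary_spec : Claim_equal_contains_compound_noun_if_necessary := by
  intro filtered_rec_result_tuples prompt_responses tokenized_responses _ _
  unfold Spec_contains_compound_noun_if_necessary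
  exact pvFinal_eq filtered_rec_result_tuples prompt_responses tokenized_responses

@[simp]
theorem contains_compound_noun_if_necessary_raises : Claim_raises_contains_compound_noun_if_necessary := by
  unfold Claim_raises_contains_compound_noun_if_necessary
  exact ⟨fun _ _ _ _ hr hp => hp hr, by decide⟩
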